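-- pv_equiv track=rewrite | github.com/atilante/JSAV-tools | matcher/buildheap.py | swaps_resemble_build_heap
-- ===== SOURCE A (Python) =====
-- def swaps_resemble_build_heap(swaps, heap_size):
--     if len(swaps) < 2:
--         return False
--
--     swap_i = 0
--     main_loop_i = heap_size // 2 # maximum initial value + 1
--
--     # index of previous child in chain of consecutive heapify swaps
--     previous_child = -1
--     for swap in swaps:
--         parent, child = swap
--         if (child - 1) // 2 != parent:
--             # invalid swap
--             return False
--         if previous_child != parent:
--             # Heapify chain does not continue from previous swap. This
--             # should mean that the index in the main loop has decreased.
--             if parent >= main_loop_i: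
--                 return False
--             main_loop_i = parent
--         # Heapify continues
--         previous_child = child
--
--     return True
-- ===== SOURCE B (Python) =====
-- def swaps_resemble_build_heap(swaps, heap_size):
--     if len(swaps) < 2:
--         return False
--     # every swap must be a real parent/child pair
--     if any((c - 1) // 2 != p for p, c in swaps):
--         return False
--     # chain starts: swaps whose parent differs from the previous swap's child
--     prevs = [-1] + [c for _, c in swaps[:-1]]
--     starts = [p for (p, _), pc in zip(swaps, prevs) if p != pc]
--     # build-heap pattern <=> the start parents, bounded above by heap_size//2,
--     # form a strictly decreasing sequence, i.e. the list equals the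
--     # descending sort of its own value set
--     bounded = [heap_size // 2] + starts
--     return sorted(set(bounded), reverse=True) == bounded
-- ===== Notes on version B (the rewrite author's own statement) =====
-- stated objective: alternative
-- what changed: Replaces A's stateful bound-tracking loop by a declarative check: validate all swaps with any(), derive chain-start parents by zipping each swap with the previous swap's child, and recognise the strictly decreasing pattern via sorted(set(...), reverse=True) == list instead of a running bound.
import Mathlib
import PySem

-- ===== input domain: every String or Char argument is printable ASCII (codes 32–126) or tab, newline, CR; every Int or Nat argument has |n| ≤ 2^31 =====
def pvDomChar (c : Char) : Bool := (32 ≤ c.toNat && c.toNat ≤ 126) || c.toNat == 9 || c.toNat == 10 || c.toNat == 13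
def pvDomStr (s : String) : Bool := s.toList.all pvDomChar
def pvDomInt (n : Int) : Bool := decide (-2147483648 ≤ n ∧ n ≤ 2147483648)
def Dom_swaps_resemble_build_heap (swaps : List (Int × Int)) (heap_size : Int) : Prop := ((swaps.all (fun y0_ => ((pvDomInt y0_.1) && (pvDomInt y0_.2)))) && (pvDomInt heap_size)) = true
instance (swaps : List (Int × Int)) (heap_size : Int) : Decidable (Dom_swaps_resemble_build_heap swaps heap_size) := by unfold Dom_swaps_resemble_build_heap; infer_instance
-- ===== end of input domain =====

-- B replaces A's stateful bound-tracking loop by a declarative check (any() validation,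
-- zip-derived chain starts, pattern recognised as equality with its own descending sorted set);
-- alternative decomposition, same observable behaviour.


-- ===== PORT A =====
-- A's single loop: state = (main_loop_i, previous_child), early returns as recursion results.
def pvLoopA : List (Int × Int) → Int → Int → Bool
  | [], _, _ => true
  | (parent, child) :: rest, main_loop_i, previous_child =>
    if PySem.Int.floordiv (child - 1) 2 ≠ parent then false
    else if previous_child ≠ parent then
      if parent ≥ main_loop_i then false
      else pvLoopA rest parent child
    else pvLoopA rest main_loop_i child

def swaps_resemble_build_heap (swaps : List (Int × Int)) (heap_size : Int) : Bool :=
  if swaps.length < 2 then false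
  else pvLoopA swaps (PySem.Int.floordiv heap_size 2) (-1)

-- ===== PORT B =====
def swaps_resemble_build_heap_alt (swaps : List (Int × Int)) (heap_size : Int) : Bool :=
  if swaps.length < 2 then false
  else if swaps.any (fun pc => PySem.Int.floordiv (pc.2 - 1) 2 ≠ pc.1) then false
  else
    -- prevs = [-1] + [c for _, c in swaps[:-1]]
    let prevs : List Int := -1 :: (PySem.List.slice swaps none (some (-1))).map (fun pc => pc.2)
    -- starts = [p for (p, _), pc in zip(swaps, prevs) if p != pc]
    let starts : List Int := ((swaps.zip prevs).filter (fun x => x.1.1 ≠ x.2)).map (fun x => x.1.1)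
    let bounded : List Int := PySem.Int.floordiv heap_size 2 :: starts
    decide (PySem.List.sorted (PySem.Set.ofList bounded) (fun x => x) true = bounded)

-- ===== PRECONDITION & SPEC =====
def Spec_swaps_resemble_build_heap (swaps : List (Int × Int)) (heap_size : Int) (out : Bool) : Prop := out = swaps_resemble_build_heap_alt swaps heap_size
instance (swaps : List (Int × Int)) (heap_size : Int) (out : Bool) : Decidable (Spec_swaps_resemble_build_heap swaps heap_size out) := by unfold Spec_swaps_resemble_build_heap; infer_instance

-- ===== CLAIM (what is proved, stated in full; the proofs are below) =====
def Claim_equal_swaps_resemble_build_heap : Prop := ∀ (swaps : List (Int × Int)) (heap_size : Int), Dom_swaps_resemble_build_heap swaps heap_size → Spec_swaps_resemble_build_heap swaps heap_size (swaps_resemble_build_heap swaps heap_size)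

-- ===== LEMMAS AND PROOFS =====

-- chain-start parents of a swap run, given the previous swap's child
def pvStartsOf : Int → List (Int × Int) → List Int
  | _, [] => []
  | prev, (p, c) :: rest => (if prev ≠ p then [p] else []) ++ pvStartsOf c rest

-- The zip/filter/map comprehension of B computes pvStartsOf.
theorem pvZip_eq_startsOf (swaps : List (Int × Int)) : ∀ (prev : Int),
    ((swaps.zip (prev :: swaps.dropLast.map (fun pc => pc.2))).filter
        (fun x => x.1.1 ≠ x.2)).map (fun x => x.1.1) = pvStartsOf prev swaps := by
  induction swaps with
  | nil => intro prev; simp [pvStartsOf]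
  | cons hd tl ih =>
    intro prev
    obtain ⟨p, c⟩ := hd
    cases tl with
    | nil =>
      by_cases h : prev = p
      · subst h; simp [pvStartsOf]
      · have h' : p ≠ prev := fun e => h e.symm
        simp [pvStartsOf, h, h']
    | cons t ts =>
      rw [List.dropLast_cons_of_ne_nil (by simp), List.map_cons, List.zip_cons_cons,
          List.filter_cons]
      by_cases h : prev = p
      · subst h; simpa [pvStartsOf] using ih c
      · have h' : p ≠ prev := fun e => h e.symm
        simpa [pvStartsOf, h, h'] using ih c

-- strictly-decreasing Pairwise peels off its head by the first comparison alone
theorem pvPairwise_gt_cons_cons (a b : Int) (S : List Int) :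
    (a :: b :: S).Pairwise (· > ·) ↔ a > b ∧ (b :: S).Pairwise (· > ·) := by
  constructor
  · intro h
    rcases List.pairwise_cons.mp h with ⟨ha, hp⟩
    exact ⟨ha b (by simp), hp⟩
  · rintro ⟨hab, hp⟩
    refine List.pairwise_cons.mpr ⟨?_, hp⟩
    intro x hx
    rcases List.mem_cons.mp hx with rfl | hx
    · exact hab
    · exact lt_trans (List.rel_of_pairwise_cons hp hx) hab

-- A's loop accepts exactly: all swaps valid AND (bound :: starts) strictly decreasing.
theorem pvLoopA_char (swaps : List (Int × Int)) : ∀ (mli prev : Int),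
    pvLoopA swaps mli prev = true ↔
      ((∀ pc ∈ swaps, PySem.Int.floordiv (pc.2 - 1) 2 = pc.1) ∧
        (mli :: pvStartsOf prev swaps).Pairwise (· > ·)) := by
  induction swaps with
  | nil => intro mli prev; simp [pvLoopA, pvStartsOf]
  | cons hd tl ih =>
    intro mli prev
    obtain ⟨p, c⟩ := hd
    by_cases hv : PySem.Int.floordiv (c - 1) 2 = p
    · have hv2 : (c - 1) / 2 = p := by
        rw [← PySem.Int.floordiv_eq_ediv_of_pos (by norm_num)]; exact hv
      by_cases hc : prev = p
      · rw [show pvLoopA ((p, c) :: tl) mli prev = pvLoopA tl mli c by simp [pvLoopA, hc, hv2]]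
        rw [ih]
        simp [pvStartsOf, hc, hv2]
      · by_cases hb : p ≥ mli
        · rw [show pvLoopA ((p, c) :: tl) mli prev = false by simp [pvLoopA, hc, hb, hv2]]
          have h1 : ¬ mli > p := by omega
          simp [pvStartsOf, hc, h1]
        · rw [show pvLoopA ((p, c) :: tl) mli prev = pvLoopA tl p c by simp [pvLoopA, hc, hb, hv2]]
          rw [ih]
          have h1 : mli > p := by omega
          rw [show pvStartsOf prev ((p, c) :: tl) = p :: pvStartsOf c tl by
                simp [pvStartsOf, hc],
              pvPairwise_gt_cons_cons]
          constructor
          · rintro ⟨ha, hp⟩; exact ⟨List.forall_mem_cons.mpr ⟨hv, ha⟩, h1, hp⟩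
          · rintro ⟨ha, -, hp⟩; exact ⟨(List.forall_mem_cons.mp ha).2, hp⟩
    · have hv2 : ¬ (c - 1) / 2 = p := by
        rw [← PySem.Int.floordiv_eq_ediv_of_pos (by norm_num)]; exact hv
      rw [show pvLoopA ((p, c) :: tl) mli prev = false by simp [pvLoopA, hv2]]
      simp [hv2]

-- descending-sorted-set equality names exactly the strictly decreasing lists
theorem pvSorted_set_desc_iff (l : List Int) :
    PySem.List.sorted (PySem.Set.ofList l) (fun x => x) true = l ↔ l.Pairwise (· > ·) := by
  constructor
  · intro h
    have hnd : l.Nodup := by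
      have hset := PySem.Set.nodup_ofList (xs := l)
      have hp : (PySem.List.sorted (PySem.Set.ofList l) (fun x => x) true).Perm (PySem.Set.ofList l) :=
        PySem.List.sorted_perm _ _ _
      rw [h] at hp
      exact hp.nodup_iff.mpr hset
    have hge : l.Pairwise (fun a b : Int => b ≤ a) := by
      have hpr := PySem.List.sorted_pairwise_rev (xs := PySem.Set.ofList l) (key := fun x : Int => x)
      rwa [h] at hpr
    have hand := List.Pairwise.and hge (List.Pairwise.imp (fun hab => hab) hnd)
    exact hand.imp (fun hab => lt_of_le_of_ne hab.1 (Ne.symm hab.2))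
  · intro h
    have hnd : l.Nodup := h.imp (fun hab => ne_of_gt hab)
    rw [PySem.Set.ofList_eq_self_of_nodup l hnd]
    exact PySem.List.sorted_rev_eq_of_perm_of_pairwise_gt l l (fun x => x) (List.Perm.refl l) h

-- ===== VERDICT (by name: the statement is the Claim_ definition above) =====
theorem swaps_resemble_build_heap_spec : Claim_equal_swaps_resemble_build_heap := by
  intro swaps heap_size _
  unfold Spec_swaps_resemble_build_heap swaps_resemble_build_heap swaps_resemble_build_heap_alt
  by_cases hlen : swaps.length < 2
  · simp [hlen]
  · simp only [if_neg hlen]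
    rw [PySem.List.slice_to_neg_one, pvZip_eq_startsOf]
    rw [Bool.eq_iff_iff, pvLoopA_char]
    by_cases hv : ∀ pc ∈ swaps, PySem.Int.floordiv (pc.2 - 1) 2 = pc.1
    · have hnone : (swaps.any fun pc => decide ¬(PySem.Int.floordiv (pc.2 - 1) 2 = pc.1)) = false := by
        simp only [List.any_eq_false, decide_eq_true_eq, not_not]
        exact hv
      rw [hnone, if_neg Bool.false_ne_true, decide_eq_true_eq, pvSorted_set_desc_iff]
      exact ⟨fun hp => hp.2, fun hp => ⟨hv, hp⟩⟩
    · have hsome : (swaps.any fun pc => decide ¬(PySem.Int.floordiv (pc.2 - 1) 2 = pc.1)) = true := by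
        rw [List.any_eq_true]
        rcases not_forall.mp hv with ⟨pc, hpc⟩
        rcases Classical.not_imp.mp hpc with ⟨hm, hne⟩
        exact ⟨pc, hm, by simpa using hne⟩
      rw [hsome, if_pos rfl]
      simp only [Bool.false_eq_true, iff_false]
      rintro ⟨ha, -⟩
      exact hv ha
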